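-- pv_equiv track=rewrite | github.com/Venurs/Python- | 20171117/work/work3_1.py | now_days
-- ===== SOURCE A (Python) =====
-- def now_days(year, month):
--     """
--     返回指定年的到指定月为止的总天数
--     :param year:指定年
--     :param month:指定月
--     :return:总天数
--     """
--     big_month = [1, 3, 5, 7, 8, 10, 12]
--     small_month = [4, 6, 9, 11]
--     sum_day = 0
--     for i in range(1, month):
--         if i == 2:
--             if (year % 4 == 0 and year % 100 != 0) or year % 400 == 0:
--                 sum_day += 29
--             else:
--                 sum_day += 28
--         elif i in big_month:
--             sum_day += 31
--         elif i in small_month: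
--             sum_day += 30
--     return sum_day
-- ===== SOURCE B (Python) =====
-- _CUM = [0, 0, 31, 59, 90, 120, 151, 181, 212, 243, 273, 304, 334, 365]
--
-- def now_days(year, month):
--     m = 1 if month < 1 else (13 if month > 13 else month)
--     leap = (year % 4 == 0 and year % 100 != 0) or year % 400 == 0
--     return _CUM[m] + (1 if m > 2 and leap else 0)
-- ===== Notes on version B (the rewrite author's own statement) =====
-- stated objective: faster
-- what changed: Replaces the month-by-month accumulation loop with a single lookup in a precomputed cumulative-days table (month clamped to [1,13]) plus one leap-day adjustment when month > 2.
import Mathlib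
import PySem

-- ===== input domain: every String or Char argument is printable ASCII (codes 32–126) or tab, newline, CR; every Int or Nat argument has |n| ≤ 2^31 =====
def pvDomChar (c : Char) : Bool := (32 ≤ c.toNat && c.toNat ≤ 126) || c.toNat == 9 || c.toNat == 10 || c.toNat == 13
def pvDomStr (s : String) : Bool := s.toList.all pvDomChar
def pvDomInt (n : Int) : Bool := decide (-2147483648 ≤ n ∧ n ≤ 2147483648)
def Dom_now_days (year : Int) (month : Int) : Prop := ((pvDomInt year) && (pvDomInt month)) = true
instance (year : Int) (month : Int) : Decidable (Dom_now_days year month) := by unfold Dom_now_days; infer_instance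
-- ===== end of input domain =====

-- B replaces A's month-by-month loop with one lookup in a fixed cumulative-days table (faster: O(1) vs O(month), confirmed).

-- ===== PORT A =====
def now_days (year : Int) (month : Int) : Int :=
  let big_month : List Int := [1, 3, 5, 7, 8, 10, 12]
  let small_month : List Int := [4, 6, 9, 11]
  (PySem.List.pyRange 1 month 1).foldl (fun sum_day i =>
    if i == 2 then
      if (PySem.Int.mod year 4 == 0 && PySem.Int.mod year 100 != 0) || PySem.Int.mod year 400 == 0 then
        sum_day + 29
      else
        sum_day + 28
    else if big_month.contains i then sum_day + 31
    else if small_month.contains i then sum_day + 30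
    else sum_day) 0

-- ===== PORT B =====
def nowDaysCum : List Int := [0, 0, 31, 59, 90, 120, 151, 181, 212, 243, 273, 304, 334, 365]

def now_days_alt (year : Int) (month : Int) : Int :=
  let m : Int := if month < 1 then 1 else if month > 13 then 13 else month
  let leap : Bool :=
    (PySem.Int.mod year 4 == 0 && PySem.Int.mod year 100 != 0) || PySem.Int.mod year 400 == 0
  -- index m is always in [1,13], so the list access never fails
  PySem.List.pyGetD nowDaysCum m 0 + (if m > 2 && leap then 1 else 0)

-- ===== PRECONDITION & SPEC =====
def Spec_now_days (year : Int) (month : Int) (out : Int) : Prop := out = now_days_alt year month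
instance (year : Int) (month : Int) (out : Int) : Decidable (Spec_now_days year month out) := by unfold Spec_now_days; infer_instance

-- ===== CLAIM (what is proved, stated in full; the proofs are below) =====
def Claim_equal_now_days : Prop := ∀ (year : Int) (month : Int), Dom_now_days year month → Spec_now_days year month (now_days year month)

-- ===== LEMMAS AND PROOFS =====

-- months ≥ 14 contribute nothing to A's loop, so its sum equals the sum up to month 14
theorem now_days_tail (year : Int) (month : Int) (h : (14:Int) ≤ month) :
    now_days year month = now_days year 14 := by
  have h' : ∀ (acc x : Int), x ∈ PySem.List.pyRange 14 month 1 →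
      (fun (sum_day i : Int) =>
        if i == 2 then
          if (PySem.Int.mod year 4 == 0 && PySem.Int.mod year 100 != 0) || PySem.Int.mod year 400 == 0 then
            sum_day + 29
          else
            sum_day + 28
        else if ([1, 3, 5, 7, 8, 10, 12] : List Int).contains i then sum_day + 31
        else if ([4, 6, 9, 11] : List Int).contains i then sum_day + 30
        else sum_day) acc x = (fun (acc : Int) (_ : Int) => acc) acc x := by
    intro acc x hx
    rw [PySem.List.mem_pyRange_one] at hx
    simp
    split_ifs <;> omega
  unfold now_days
  rw [PySem.List.pyRange_one_append 1 14 month (by norm_num) h, List.foldl_append,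
      PySem.List.foldl_congr_mem _ _ (fun (acc : Int) (_ : Int) => acc) _ h', List.foldl_fixed]

-- B is also constant for month ≥ 14 (both clamp branches give m = 13)
theorem now_days_alt_tail (year : Int) (month : Int) (h : (14:Int) ≤ month) :
    now_days_alt year month = now_days_alt year 14 := by
  unfold now_days_alt
  have h1 : ¬ month < 1 := by omega
  have h2 : month > 13 := by omega
  simp [h1, h2]

-- the agreement at one fixed month, for any year
theorem now_days_eq_at (year : Int) (month : Int) (h2 : (2:Int) ≤ month) (h14 : month ≤ 14) :
    now_days year month = now_days_alt year month := by
  interval_cases month <;>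
    (simp [now_days, now_days_alt, PySem.List.pyRange_one, List.range_succ, nowDaysCum,
       PySem.List.pyGetD] <;>
     (by_cases hc : (4 ∣ year ∧ ¬(100:ℤ) ∣ year ∨ (400:ℤ) ∣ year) <;> simp [hc]))

-- ===== VERDICT (by name: the statement is the Claim_ definition above) =====
theorem now_days_spec : Claim_equal_now_days := by
  unfold Claim_equal_now_days Spec_now_days
  intro year month _
  rcases (by omega : month ≤ 1 ∨ (2 ≤ month ∧ month ≤ 14) ∨ 15 ≤ month) with h | ⟨h2, h14⟩ | h
  · have hr : PySem.List.pyRange 1 month 1 = [] := PySem.List.pyRange_one_eq_nil h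
    rcases (by omega : month < 1 ∨ month = 1) with h1 | h1
    · simp [now_days, now_days_alt, hr, h1, nowDaysCum, PySem.List.pyGetD]
    · subst h1
      simp [now_days, now_days_alt, hr, nowDaysCum, PySem.List.pyGetD]
  · exact now_days_eq_at year month h2 h14
  · rw [now_days_tail year month (by omega), now_days_alt_tail year month (by omega)]
    exact now_days_eq_at year 14 (by norm_num) (by norm_num)
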